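-- pv_equiv track=rewrite | github.com/ruck-45/True_programme | Programming/DSA/Python/07_heap_tree.py | graph_del
-- ===== SOURCE A (Python) =====
-- def graph_del(arr,is_root):
--     if arr:
--         temp = arr.pop()
--
--     if arr and is_root:
--         arr[0] = temp
--
--         cur = 0
--         child1 = 2*cur+1
--         child2 = 2*cur+2
--
--         length = len(arr)
--
--         while child1<length:
--             swap_ind = child1
--
--             if child2<length and arr[child1] < arr[child2]:
--                 swap_ind = child2
--
--             if arr[swap_ind]>arr[cur]:
--                     temp = arr[cur]
--                     arr[cur] = arr[swap_ind]
--                     arr[swap_ind] = temp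
--
--                     cur = swap_ind
--                     child1 = 2*cur+1
--                     child2 = 2*cur+2
--             else:
--                 break
--
--     return arr
-- ===== SOURCE B (Python) =====
-- def graph_del(arr, is_root):
--     if arr:
--         temp = arr.pop()
--     if arr and is_root:
--         n = len(arr)
--         # stage 1: read-only scan computing the descent path: follow the larger
--         # child (left on ties) while it beats temp
--         path = [0]
--         while True:
--             i = path[-1]
--             c = 2 * i + 1
--             if c + 1 < n and arr[c] < arr[c + 1]:
--                 c += 1
--             if c < n and arr[c] > temp:
--                 path.append(c)
--             else:
--                 break
--         # stage 2: replacement table (each path index takes its successor's old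
--         # value, the last takes temp), then rebuild the list in one comprehension
--         rep = {path[k]: arr[path[k + 1]] for k in range(len(path) - 1)}
--         rep[path[-1]] = temp
--         arr[:] = [rep.get(i, x) for i, x in enumerate(arr)]
--     return arr
-- ===== Notes on version B (the rewrite author's own statement) =====
-- stated objective: alternative
-- what changed: B splits A's in-place swap-down loop into a read-only scan that computes the whole descent path, then builds a replacement table (path index -> successor's old value, last -> the popped element) and rebuilds the list in one comprehension, instead of A's repeated parent/child swaps.
import Mathlib
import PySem

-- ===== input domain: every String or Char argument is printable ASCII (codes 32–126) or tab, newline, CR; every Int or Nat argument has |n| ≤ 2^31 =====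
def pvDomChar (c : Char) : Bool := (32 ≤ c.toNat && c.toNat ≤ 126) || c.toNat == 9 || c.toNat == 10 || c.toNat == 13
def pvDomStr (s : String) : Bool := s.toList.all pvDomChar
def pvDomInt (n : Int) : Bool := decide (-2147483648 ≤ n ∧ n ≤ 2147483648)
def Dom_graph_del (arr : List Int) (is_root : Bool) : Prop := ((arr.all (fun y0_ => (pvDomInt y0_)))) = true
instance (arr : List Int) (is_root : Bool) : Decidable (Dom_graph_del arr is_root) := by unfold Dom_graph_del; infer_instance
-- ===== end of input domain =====

-- B replaces A's in-place swap-down loop by two stages: a read-only scan that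
-- computes the descent path, then a replacement table and a single rebuild of
-- the list (equal returned value; both Pythons mutate arr in place equally).

-- ===== PORT A =====
-- A's while loop as a recursion on cur; all indices read in the loop are
-- in range, so arr.getD i 0 is exact for Python's arr[i] here.
def siftA (arr : List Int) (cur : Nat) : List Int :=
  let child1 := 2 * cur + 1
  let child2 := 2 * cur + 2
  let length := arr.length
  if h1 : child1 < length then
    let swap_ind := if child2 < length ∧ arr.getD child1 0 < arr.getD child2 0 then child2 else child1
    if arr.getD swap_ind 0 > arr.getD cur 0 then
      siftA ((arr.set cur (arr.getD swap_ind 0)).set swap_ind (arr.getD cur 0)) swap_ind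
    else arr
  else arr
termination_by arr.length - cur
decreasing_by
  simp only [List.length_set]
  split
  · next h => omega
  · omega

def graph_del (arr : List Int) (is_root : Bool) : List Int :=
  if arr = [] then arr
  else
    let temp := arr.getD (arr.length - 1) 0
    let arr := arr.dropLast
    if arr ≠ [] ∧ is_root then siftA (arr.set 0 temp) 0 else arr

-- ===== PORT B =====
-- Source B stage 1: c = 2*i+1, bumped to 2*i+2 when that child exists and is larger
def pickB (arr : List Int) (i n : Nat) : Nat :=
  if 2 * i + 2 < n ∧ arr.getD (2 * i + 1) 0 < arr.getD (2 * i + 2) 0 then 2 * i + 2 else 2 * i + 1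

lemma pickB_gt (arr : List Int) (i n : Nat) : i < pickB arr i n := by
  unfold pickB; split <;> omega

-- Source B's path-building while loop (appends c while arr[c] > temp), as a recursion on i
def pathB (arr : List Int) (n : Nat) (v : Int) (i : Nat) : List Nat :=
  let c := pickB arr i n
  if h : c < n ∧ arr.getD c 0 > v then i :: pathB arr n v c else [i]
termination_by n - i
decreasing_by
  have := pickB_gt arr i n
  omega

def graph_del_alt (arr : List Int) (is_root : Bool) : List Int :=
  if arr = [] then arr
  else
    let temp := arr.getD (arr.length - 1) 0
    let arr := arr.dropLast
    if arr ≠ [] ∧ is_root then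
      let n := arr.length
      let path := pathB arr n temp 0
      -- the dict comprehension over range(len(path)-1), then rep[path[-1]] = temp
      let rep := ((List.range (path.length - 1)).foldl
        (fun d k => d.insert (path.getD k 0) (arr.getD (path.getD (k + 1) 0) 0))
        PySem.Dict.empty).insert (path.getD (path.length - 1) 0) temp
      -- [rep.get(i, x) for i, x in enumerate(arr)]
      (PySem.List.enumerate arr 0).map (fun p => (rep.get? p.1.toNat).getD p.2)
    else arr

-- ===== PRECONDITION & SPEC =====
def Spec_graph_del (arr : List Int) (is_root : Bool) (out : List Int) : Prop := out = graph_del_alt arr is_root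
instance (arr : List Int) (is_root : Bool) (out : List Int) : Decidable (Spec_graph_del arr is_root out) := by unfold Spec_graph_del; infer_instance

-- ===== CLAIM (what is proved, stated in full; the proofs are below) =====
def Claim_equal_graph_del : Prop := ∀ (arr : List Int) (is_root : Bool), Dom_graph_del arr is_root → Spec_graph_del arr is_root (graph_del arr is_root)

-- ===== LEMMAS AND PROOFS =====

lemma getD_set_self (l : List Int) (i : Nat) (v : Int) (h : i < l.length) :
    (l.set i v).getD i 0 = v := by
  simp [List.getD, h]

lemma getD_set_ne (l : List Int) (i j : Nat) (v : Int) (h : i ≠ j) :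
    (l.set i v).getD j 0 = l.getD j 0 := by
  simp [List.getD, List.getElem?_set_ne, h]

-- pickB reads only indices > i, so a write below i does not change it
lemma pathB_eq (arr : List Int) (n : Nat) (v : Int) (i : Nat) :
    pathB arr n v i = if pickB arr i n < n ∧ arr.getD (pickB arr i n) 0 > v
      then i :: pathB arr n v (pickB arr i n) else [i] := by
  rw [pathB]; rfl

-- pickB reads only indices > i, so a write below i does not change it
lemma pickB_set (arr : List Int) (j i n : Nat) (w : Int) (h : j < i) :
    pickB (arr.set j w) i n = pickB arr i n := by
  unfold pickB
  rw [getD_set_ne _ _ _ _ (by omega), getD_set_ne _ _ _ _ (by omega)]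

lemma pathB_set (arr : List Int) (n : Nat) (v : Int) : ∀ (k i j : Nat) (w : Int),
    n - i ≤ k → j < i → pathB (arr.set j w) n v i = pathB arr n v i := by
  intro k
  induction k with
  | zero =>
    intro i j w hk hj
    have h1 : ¬ pickB arr i n < n := by have := pickB_gt arr i n; omega
    rw [pathB_eq (arr.set j w) n v i, pathB_eq arr n v i, pickB_set _ _ _ _ _ hj,
      if_neg (fun h => h1 h.1), if_neg (fun h => h1 h.1)]
  | succ k ih =>
    intro i j w hk hj
    rw [pathB_eq (arr.set j w) n v i, pathB_eq arr n v i, pickB_set _ _ _ _ _ hj]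
    have hci : i < pickB arr i n := pickB_gt arr i n
    rw [getD_set_ne _ _ _ _ (by omega : j ≠ pickB arr i n)]
    by_cases h : pickB arr i n < n ∧ arr.getD (pickB arr i n) 0 > v
    · rw [if_pos h, if_pos h, ih (pickB arr i n) j w (by omega) (by omega)]
    · rw [if_neg h, if_neg h]

lemma pathB_ge (arr : List Int) (n : Nat) (v : Int) : ∀ (k i : Nat),
    n - i ≤ k → ∀ x ∈ pathB arr n v i, i ≤ x := by
  intro k
  induction k with
  | zero =>
    intro i hk x hx
    have h1 : ¬ pickB arr i n < n := by have := pickB_gt arr i n; omega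
    rw [pathB_eq arr n v i, if_neg (fun h => h1 h.1)] at hx
    simp at hx; omega
  | succ k ih =>
    intro i hk x hx
    rw [pathB_eq arr n v i] at hx
    have hci := pickB_gt arr i n
    by_cases h : pickB arr i n < n ∧ arr.getD (pickB arr i n) 0 > v
    · rw [if_pos h] at hx
      rcases List.mem_cons.mp hx with rfl | hx
      · exact le_refl _
      · have := ih (pickB arr i n) (by omega) x hx; omega
    · rw [if_neg h] at hx; simp at hx; omega

lemma pathB_lt (arr : List Int) (n : Nat) (v : Int) : ∀ (k i : Nat),
    n - i ≤ k → i < n → ∀ x ∈ pathB arr n v i, x < n := by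
  intro k
  induction k with
  | zero => intro i hk hi; omega
  | succ k ih =>
    intro i hk hi x hx
    rw [pathB_eq arr n v i] at hx
    by_cases h : pickB arr i n < n ∧ arr.getD (pickB arr i n) 0 > v
    · rw [if_pos h] at hx
      have hci := pickB_gt arr i n
      rcases List.mem_cons.mp hx with rfl | hx
      · exact hi
      · exact ih (pickB arr i n) (by omega) h.1 x hx
    · rw [if_neg h] at hx; simp at hx; omega

lemma pathB_pairwise (arr : List Int) (n : Nat) (v : Int) : ∀ (k i : Nat),
    n - i ≤ k → (pathB arr n v i).Pairwise (· < ·) := by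
  intro k
  induction k with
  | zero =>
    intro i hk
    have h1 : ¬ pickB arr i n < n := by have := pickB_gt arr i n; omega
    rw [pathB_eq arr n v i, if_neg (fun h => h1 h.1)]
    simp
  | succ k ih =>
    intro i hk
    rw [pathB_eq arr n v i]
    have hci := pickB_gt arr i n
    by_cases h : pickB arr i n < n ∧ arr.getD (pickB arr i n) 0 > v
    · rw [if_pos h]
      refine List.pairwise_cons.mpr ⟨?_, ih (pickB arr i n) (by omega)⟩
      intro x hx
      have := pathB_ge arr n v (n - pickB arr i n) (pickB arr i n) (le_refl _) x hx
      omega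
    · rw [if_neg h]; simp

lemma pathB_ne_nil (arr : List Int) (n : Nat) (v : Int) (i : Nat) :
    ∃ t, pathB arr n v i = i :: t := by
  rw [pathB_eq arr n v i]
  by_cases h : pickB arr i n < n ∧ arr.getD (pickB arr i n) 0 > v
  · rw [if_pos h]; exact ⟨_, rfl⟩
  · rw [if_neg h]; exact ⟨[], rfl⟩

-- proof-only helpers: the writes of the sift-down along a path, and the
-- value a path assigns to an index (successor's old value, v at the end)
def applyPath (v : Int) : List Int → List Nat → List Int
  | a, [] => a
  | a, [i] => a.set i v
  | a, i :: c :: rest => applyPath v (a.set i (a.getD c 0)) (c :: rest)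

def succIn (a : List Int) (v : Int) : List Nat → Nat → Option Int
  | [], _ => none
  | [i], j => if j = i then some v else none
  | i :: c :: rest, j => if j = i then some (a.getD c 0) else succIn a v (c :: rest) j

-- A's swap loop realizes exactly the writes of applyPath along pathB
lemma siftA_eq_applyPath (v : Int) : ∀ (k : Nat) (arr : List Int) (cur : Nat),
    arr.length - cur ≤ k → cur < arr.length →
    siftA (arr.set cur v) cur = applyPath v arr (pathB arr arr.length v cur) := by
  intro k
  induction k with
  | zero => intro arr cur hk hc; omega
  | succ k ih =>
    intro arr cur hk hc
    rw [siftA, pathB_eq arr arr.length v cur]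
    simp only [List.length_set]
    have hc1 : 2 * cur + 1 ≠ cur := by omega
    have hc2 : 2 * cur + 2 ≠ cur := by omega
    by_cases h1 : 2 * cur + 1 < arr.length
    · rw [dif_pos h1]
      rw [getD_set_ne _ _ _ _ (Ne.symm hc1), getD_set_ne _ _ _ _ (Ne.symm hc2),
          getD_set_self _ _ _ hc]
      have hpick : (if 2 * cur + 2 < arr.length ∧ arr.getD (2 * cur + 1) 0 < arr.getD (2 * cur + 2) 0
          then 2 * cur + 2 else 2 * cur + 1) = pickB arr cur arr.length := by
        unfold pickB; rfl
      rw [hpick]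
      set c : Nat := pickB arr cur arr.length with hcdef
      have hcc : cur < c := pickB_gt arr cur arr.length
      have hcn : c < arr.length ∨ c = 2 * cur + 1 := by
        rw [hcdef]; unfold pickB; split
        · next h => exact Or.inl h.1
        · exact Or.inr rfl
      rw [getD_set_ne _ _ _ _ (by omega : cur ≠ c)]
      by_cases hg : arr.getD c 0 > v
      · have hcn' : c < arr.length := by rcases hcn with h | h; exacts [h, by omega]
        rw [if_pos hg, if_pos (⟨hcn', hg⟩ : c < arr.length ∧ arr.getD c 0 > v)]
        rw [List.set_set]
        obtain ⟨t, ht⟩ := pathB_ne_nil arr arr.length v c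
        rw [ht, applyPath]
        have harr' : (arr.set cur (arr.getD c 0)).length = arr.length := by simp
        have := ih (arr.set cur (arr.getD c 0)) c
          (by rw [harr']; omega) (by rw [harr']; exact hcn')
        rw [harr'] at this
        rw [this, pathB_set arr arr.length v (arr.length - c) c cur _ (le_refl _) hcc, ht]
      · rw [if_neg hg, if_neg (fun h => hg h.2), applyPath]
    · rw [dif_neg h1]
      have hpk : pickB arr cur arr.length = 2 * cur + 1 := by
        unfold pickB; rw [if_neg]; intro h; omega
      rw [if_neg (by rw [hpk]; exact fun h => h1 h.1), applyPath]

lemma succIn_set (v : Int) : ∀ (p : List Nat) (a : List Int) (j0 : Nat) (w : Int),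
    (∀ x ∈ p, j0 < x) → ∀ j, succIn (a.set j0 w) v p j = succIn a v p j := by
  intro p
  induction p with
  | nil => intro a j0 w h j; rfl
  | cons i t ih =>
    intro a j0 w h j
    cases t with
    | nil => rfl
    | cons c rest =>
      rw [succIn, succIn]
      have hc : j0 < c := h c (by simp)
      rw [getD_set_ne _ _ _ _ (by omega)]
      by_cases hj : j = i
      · simp [hj]
      · rw [if_neg hj, if_neg hj, ih a j0 w (fun x hx => h x (by simp [hx]))]

lemma succIn_none (a : List Int) (v : Int) : ∀ (p : List Nat) (j : Nat),
    j ∉ p → succIn a v p j = none := by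
  intro p
  induction p with
  | nil => intro j h; rfl
  | cons i t ih =>
    intro j h
    cases t with
    | nil => rw [succIn, if_neg (by simp at h; omega)]
    | cons c rest =>
      simp only [List.mem_cons, not_or] at h
      rw [succIn, if_neg h.1]
      exact ih j (by simp [h.2.1, h.2.2])

lemma applyPath_length (v : Int) : ∀ (p : List Nat) (a : List Int),
    (applyPath v a p).length = a.length := by
  intro p
  induction p with
  | nil => intro a; rfl
  | cons i t ih =>
    intro a
    cases t with
    | nil => simp [applyPath]
    | cons c rest => rw [applyPath, ih]; simp

lemma applyPath_getD (v : Int) : ∀ (p : List Nat) (a : List Int),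
    p.Pairwise (· < ·) → (∀ x ∈ p, x < a.length) → p ≠ [] → ∀ j, j < a.length →
    (applyPath v a p).getD j 0 = (succIn a v p j).getD (a.getD j 0) := by
  intro p
  induction p with
  | nil => intro a _ _ h; exact absurd rfl h
  | cons i t ih =>
    intro a hp hlt _ j hj
    cases t with
    | nil =>
      rw [applyPath, succIn]
      by_cases hji : j = i
      · subst hji; rw [if_pos rfl, getD_set_self _ _ _ hj]; rfl
      · rw [if_neg hji, getD_set_ne _ _ _ _ (by omega)]; rfl
    | cons c rest =>
      have hic : ∀ x ∈ c :: rest, i < x := fun x hx => (List.pairwise_cons.mp hp).1 x hx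
      have hi : i < a.length := hlt i (by simp)
      rw [applyPath, succIn]
      have hlen : (a.set i (a.getD c 0)).length = a.length := by simp
      rw [ih (a.set i (a.getD c 0)) (List.pairwise_cons.mp hp).2
        (fun x hx => by rw [hlen]; exact hlt x (by simp [hx])) (by simp) j (by omega)]
      rw [succIn_set v (c :: rest) a i _ hic]
      by_cases hji : j = i
      · subst hji
        rw [if_pos rfl, succIn_none a v _ j (fun hm => by have := hic j hm; omega)]
        rw [getD_set_self _ _ _ hi]
        rfl
      · rw [if_neg hji, getD_set_ne _ _ _ _ (by omega)]

-- the pairs the dict comprehension inserts, structurally along the path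
def pairsOf (arr : List Int) : List Nat → List (Nat × Int)
  | [] => []
  | [_] => []
  | i :: c :: rest => (i, arr.getD c 0) :: pairsOf arr (c :: rest)

lemma range_map_eq_pairsOf (arr : List Int) : ∀ (p : List Nat),
    (List.range (p.length - 1)).map
      (fun k => (p.getD k 0, arr.getD (p.getD (k + 1) 0) 0)) = pairsOf arr p := by
  intro p
  induction p with
  | nil => rfl
  | cons i t ih =>
    cases t with
    | nil => rfl
    | cons c rest =>
      rw [pairsOf]
      have hlen : (i :: c :: rest).length - 1 = ((c :: rest).length - 1) + 1 := by simp
      rw [hlen, List.range_succ_eq_map, List.map_cons, List.map_map]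
      refine List.cons_eq_cons.mpr ⟨by simp, ?_⟩
      rw [← ih]
      apply List.map_congr_left
      intro k _
      simp

lemma keys_pairsOf (arr : List Int) : ∀ (p : List Nat),
    (pairsOf arr p).map Prod.fst = p.dropLast := by
  intro p
  induction p with
  | nil => rfl
  | cons i t ih =>
    cases t with
    | nil => rfl
    | cons c rest => rw [pairsOf, List.map_cons, ih]; rfl

lemma lastD_cons_cons (i c : Nat) (rest : List Nat) :
    (i :: c :: rest).getD ((i :: c :: rest).length - 1) 0
      = (c :: rest).getD ((c :: rest).length - 1) 0 := by
  simp [List.getD]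
  rfl

-- lookup in (dict of pairsOf p, then last ↦ v) is exactly succIn
lemma mkPairs_get (arr : List Int) (v : Int) : ∀ (p : List Nat),
    p.Pairwise (· < ·) → p ≠ [] → ∀ j : Nat,
    ((PySem.Dict.mk (pairsOf arr p)).insert (p.getD (p.length - 1) 0) v).get? j
      = succIn arr v p j := by
  intro p
  induction p with
  | nil => intro _ h; exact absurd rfl h
  | cons i t ih =>
    intro hp _ j
    cases t with
    | nil =>
      rw [pairsOf, succIn]
      have hgd : ([i] : List Nat).getD (([i] : List Nat).length - 1) 0 = i := rfl
      rw [hgd]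
      by_cases hj : j = i
      · subst hj
        rw [if_pos rfl]
        exact PySem.Dict.get?_insert_self _ _ _
      · rw [if_neg hj, PySem.Dict.get?_insert_of_ne _ _ hj]
        exact PySem.Dict.get?_empty j
    | cons c rest =>
      rw [pairsOf, succIn, lastD_cons_cons]
      set last := (c :: rest).getD ((c :: rest).length - 1) 0 with hlast
      have hmemlast : last ∈ c :: rest := by
        rw [hlast, List.getD_eq_getElem?_getD]
        have hl : (c :: rest).length - 1 < (c :: rest).length := by simp
        rw [List.getElem?_eq_getElem hl]
        exact List.getElem_mem _
      have hil : i < last := (List.pairwise_cons.mp hp).1 last hmemlast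
      have hih := ih (List.pairwise_cons.mp hp).2 (by simp) j
      by_cases hj : j = i
      · subst hj
        rw [if_pos rfl, PySem.Dict.get?_insert_of_ne _ _ (by omega : j ≠ last),
          PySem.Dict.get?_mk_cons, if_pos (by simp)]
      · rw [if_neg hj, ← hih]
        by_cases hjl : j = last
        · subst hjl
          rw [PySem.Dict.get?_insert_self, PySem.Dict.get?_insert_self]
        · rw [PySem.Dict.get?_insert_of_ne _ _ hjl, PySem.Dict.get?_insert_of_ne _ _ hjl,
            PySem.Dict.get?_mk_cons, if_neg (by simpa using fun h => hj h.symm)]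

-- the port's dict-comprehension foldl builds exactly Dict.mk (pairsOf arr p)
lemma foldl_insert_eq_mk (arr : List Int) (p : List Nat) (hp : p.Pairwise (· < ·)) :
    (List.range (p.length - 1)).foldl
      (fun d k => d.insert (p.getD k 0) (arr.getD (p.getD (k + 1) 0) 0))
      PySem.Dict.empty = PySem.Dict.mk (pairsOf arr p) := by
  have hnd : p.dropLast.Nodup :=
    ((hp.sublist (List.dropLast_sublist p)).imp (fun h => Nat.ne_of_lt h))
  have hkeys : (List.range (p.length - 1)).map (fun k => p.getD k 0) = p.dropLast := by
    have := congrArg (List.map Prod.fst) (range_map_eq_pairsOf arr p)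
    rw [List.map_map, keys_pairsOf] at this
    exact this
  apply PySem.Dict.ext
  rw [PySem.Dict.items_foldl_insert_fresh (List.range (p.length - 1))
    (fun k => p.getD k 0) (fun k => arr.getD (p.getD (k + 1) 0) 0) PySem.Dict.empty
    (fun a _ => PySem.Dict.contains_empty _) (by rw [hkeys]; exact hnd)]
  rw [range_map_eq_pairsOf]
  rfl

-- ===== VERDICT (by name: the statement is the Claim_ definition above) =====
theorem graph_del_spec : Claim_equal_graph_del := by
  intro arr is_root _
  unfold Spec_graph_del graph_del graph_del_alt
  by_cases he : arr = []
  · simp [he]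
  · simp only [he, if_neg, not_false_iff]
    by_cases hr : arr.dropLast ≠ [] ∧ is_root = true
    · rw [if_pos hr, if_pos hr]
      set a := arr.dropLast with ha
      set v := arr.getD (arr.length - 1) 0 with hv
      set p := pathB a a.length v 0 with hpdef
      have hlen : 0 < a.length := by
        cases hl : a with
        | nil => exact absurd hl hr.1
        | cons x t => simp
      have hpw : p.Pairwise (· < ·) := pathB_pairwise a a.length v a.length 0 (by omega)
      have hplt : ∀ x ∈ p, x < a.length := pathB_lt a a.length v a.length 0 (by omega) hlen
      have hpne : p ≠ [] := by obtain ⟨t, ht⟩ := pathB_ne_nil a a.length v 0; rw [hpdef, ht]; simp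
      show siftA (a.set 0 v) 0 =
        (PySem.List.enumerate a 0).map (fun q =>
          ((((List.range (p.length - 1)).foldl
            (fun d k => d.insert (p.getD k 0) (a.getD (p.getD (k + 1) 0) 0))
            PySem.Dict.empty).insert (p.getD (p.length - 1) 0) v).get? q.1.toNat).getD q.2)
      rw [foldl_insert_eq_mk a p hpw,
        siftA_eq_applyPath v a.length a 0 (by omega) hlen, ← hpdef]
      apply List.ext_getElem
      · rw [applyPath_length, List.length_map, PySem.List.length_enumerate]
      · intro j h1 h2
        rw [List.getElem_map, PySem.List.getElem_enumerate]
        have hj : j < a.length := by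
          rw [List.length_map, PySem.List.length_enumerate] at h2; exact h2
        have htn : ((0 : Int) + (j : Int)).toNat = j := by omega
        rw [htn, mkPairs_get a v p hpw hpne j]
        rw [← List.getD_eq_getElem (applyPath v a p) 0 h1,
          applyPath_getD v p a hpw hplt hpne j hj,
          List.getD_eq_getElem a 0 hj]
    · rw [if_neg hr, if_neg hr]
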